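-- pv_equiv track=rewrite | github.com/horatioh13/Portrait-Outliner | multiplemasks.py | unest_list
-- ===== SOURCE A (Python) =====
-- def unest_list(points):
--     visited_points = set()
--     result = []
--     current_list = []
--
--     for point in points:
--         if point in visited_points:
--             if current_list:
--                 result.append(current_list)
--             current_list = [point]
--             result.append(current_list)
--             current_list = []
--         else:
--             visited_points.add(point)
--             current_list.append(point)
--
--     if current_list:
--         result.append(current_list)
--
--     return result
-- ===== SOURCE B (Python) =====
-- def unest_list(points):
--     pts = list(points)
--     seen = set()
--     reps = []
--     for i, p in enumerate(pts):
--         if p in seen: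
--             reps.append(i)
--         else:
--             seen.add(p)
--     out = []
--     start = 0
--     for r in reps:
--         if start < r:
--             out.append(pts[start:r])
--         out.append([pts[r]])
--         start = r + 1
--     if start < len(pts):
--         out.append(pts[start:])
--     return out
-- ===== Notes on version B (the rewrite author's own statement) =====
-- stated objective: alternative
-- what changed: B first computes the list of repeat indices in one membership pass, then builds the output by slicing the materialized list between a running start cursor and each repeat index, instead of A's element-by-element accumulate-and-flush of a current run.
import Mathlib
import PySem

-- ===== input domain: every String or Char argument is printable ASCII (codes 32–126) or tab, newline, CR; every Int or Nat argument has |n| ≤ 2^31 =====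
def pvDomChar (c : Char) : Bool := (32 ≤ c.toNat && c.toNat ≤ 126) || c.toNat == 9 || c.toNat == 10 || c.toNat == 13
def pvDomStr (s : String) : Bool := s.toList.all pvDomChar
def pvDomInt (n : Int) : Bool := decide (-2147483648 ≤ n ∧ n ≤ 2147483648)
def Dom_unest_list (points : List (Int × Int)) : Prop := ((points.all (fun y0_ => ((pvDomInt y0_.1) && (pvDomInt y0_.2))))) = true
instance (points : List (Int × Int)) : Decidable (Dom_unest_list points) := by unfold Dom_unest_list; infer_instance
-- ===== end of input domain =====

-- B replaces A's element-by-element accumulate-and-flush with a repeat-index pass followed by slicing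
-- between boundary indices (objective: alternative decomposition, same O(n) cost).

-- ===== PORT A =====
-- state = (visited_points, result, current_list); the final 'if current_list' flush follows the fold
def unest_list (points : List (Int × Int)) : List (List (Int × Int)) :=
  let st := points.foldl
    (fun (st : PySem.Set (Int × Int) × List (List (Int × Int)) × List (Int × Int)) point =>
      if PySem.Set.contains st.1 point then
        (st.1, (if st.2.2 = [] then st.2.1 else st.2.1 ++ [st.2.2]) ++ [[point]], ([] : List (Int × Int)))
      else
        (PySem.Set.add st.1 point, st.2.1, st.2.2 ++ [point]))
    (PySem.Set.empty, [], [])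
  if st.2.2 = [] then st.2.1 else st.2.1 ++ [st.2.2]

-- ===== PORT B =====
-- first pass of Source B: indices (from enumerate, here Nat since they index pts) where the point repeats
def pvRepsAux (seen : PySem.Set (Int × Int)) (i : Nat) : List (Int × Int) → List Nat
  | [] => []
  | p :: rest =>
      if PySem.Set.contains seen p then i :: pvRepsAux seen (i + 1) rest
      else pvRepsAux (PySem.Set.add seen p) (i + 1) rest

-- second pass of Source B: the slice pts[start:r] is (pts.drop start).take (r - start) — exact for these
-- nonnegative in-range Nat bounds (PySem.List.slice_natCast); pts[r] is in range, so getD is exact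
def pvConsume (pts : List (Int × Int)) : List Nat → Nat → List (List (Int × Int)) → List (List (Int × Int))
  | [], start, out => if start < pts.length then out ++ [pts.drop start] else out
  | r :: rl, start, out =>
      pvConsume pts rl (r + 1)
        (out ++ (if start < r then [(pts.drop start).take (r - start)] else []) ++ [[pts.getD r (0, 0)]])

def unest_list_alt (points : List (Int × Int)) : List (List (Int × Int)) :=
  pvConsume points (pvRepsAux PySem.Set.empty 0 points) 0 []

-- ===== PRECONDITION & SPEC =====
def Spec_unest_list (points : List (Int × Int)) (out : List (List (Int × Int))) : Prop := out = unest_list_alt points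
instance (points : List (Int × Int)) (out : List (List (Int × Int))) : Decidable (Spec_unest_list points out) := by unfold Spec_unest_list; infer_instance

-- ===== CLAIM (what is proved, stated in full; the proofs are below) =====
def Claim_equal_unest_list : Prop := ∀ (points : List (Int × Int)), Dom_unest_list points → Spec_unest_list points (unest_list points)

-- ===== LEMMAS AND PROOFS =====

-- common reference: A's loop written as structural recursion carrying (seen, pending run)
def pvRuns (seen : PySem.Set (Int × Int)) (cur : List (Int × Int)) : List (Int × Int) → List (List (Int × Int))
  | [] => if cur = [] then [] else [cur]
  | p :: rest =>
      if PySem.Set.contains seen p then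
        (if cur = [] then [] else [cur]) ++ [[p]] ++ pvRuns seen [] rest
      else pvRuns (PySem.Set.add seen p) (cur ++ [p]) rest

theorem pvA_eq_runs (rest : List (Int × Int)) :
    ∀ (seen : PySem.Set (Int × Int)) (res : List (List (Int × Int))) (cur : List (Int × Int)),
    (let st := rest.foldl
        (fun (st : PySem.Set (Int × Int) × List (List (Int × Int)) × List (Int × Int)) point =>
          if PySem.Set.contains st.1 point then
            (st.1, (if st.2.2 = [] then st.2.1 else st.2.1 ++ [st.2.2]) ++ [[point]], ([] : List (Int × Int)))
          else
            (PySem.Set.add st.1 point, st.2.1, st.2.2 ++ [point]))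
        (seen, res, cur)
      if st.2.2 = [] then st.2.1 else st.2.1 ++ [st.2.2]) = res ++ pvRuns seen cur rest := by
  induction rest with
  | nil => intro seen res cur; simp [pvRuns]; split <;> simp_all
  | cons p rest ih =>
      intro seen res cur
      simp only [List.foldl_cons, pvRuns]
      by_cases h : PySem.Set.contains seen p
      · simp only [h, if_pos]
        rw [ih]
        by_cases hc : cur = [] <;> simp [hc]
      · simp only [h, Bool.false_eq_true, if_false]
        rw [ih]

theorem pvB_eq_runs (rest : List (Int × Int)) :
    ∀ (seen : PySem.Set (Int × Int)) (i s : Nat) (out : List (List (Int × Int)))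
      (pts : List (Int × Int)), pts.drop i = rest → s ≤ i →
    pvConsume pts (pvRepsAux seen i rest) s out
      = out ++ pvRuns seen ((pts.drop s).take (i - s)) rest := by
  induction rest with
  | nil =>
      intro seen i s out pts h1 hs
      have hlen : pts.length ≤ i := by
        by_contra h
        have h2 : (pts.drop i).length = pts.length - i := List.length_drop ..
        rw [h1] at h2
        simp at h2
        omega
      have htake : (pts.drop s).take (i - s) = pts.drop s :=
        List.take_of_length_le (by simp; omega)
      simp only [pvRepsAux, pvConsume, pvRuns, htake]
      by_cases hsl : s < pts.length
      · rw [if_pos hsl, if_neg (by simp; omega)]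
      · rw [if_neg hsl, if_pos (by simp; omega)]
        simp
  | cons p rest ih =>
      intro seen i s out pts h1 hs
      have hi : i < pts.length := by
        by_contra h
        rw [List.drop_eq_nil_of_le (Nat.le_of_not_lt h)] at h1
        exact (List.cons_ne_nil p rest) h1.symm
      have hdrop : pts.drop (i + 1) = rest := by
        rw [← List.tail_drop, h1]; rfl
      have hget : pts[i]? = some p := by
        have h0 : (pts.drop i)[0]? = pts[i]? := by
          rw [List.getElem?_drop]; rfl
        rw [← h0, h1]; rfl
      have hgetD : pts.getD i (0, 0) = p := by
        simp [List.getD, hget]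
      have hsplit : (pts.drop s).take (i + 1 - s) = (pts.drop s).take (i - s) ++ [p] := by
        have he : i + 1 - s = (i - s) + 1 := by omega
        rw [he, List.take_add_one]
        have hg : (pts.drop s)[i - s]? = some p := by
          rw [List.getElem?_drop]
          have hsi : s + (i - s) = i := by omega
          rw [hsi, hget]
        simp [hg]
      simp only [pvRepsAux]
      by_cases h : PySem.Set.contains seen p
      · simp only [h, if_pos, pvConsume]
        rw [ih seen (i + 1) (i + 1) _ pts hdrop (le_refl _)]
        simp only [Nat.sub_self, List.take_zero, pvRuns, h, if_pos, hgetD]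
        by_cases hc : s < i
        · have hne : (pts.drop s).take (i - s) ≠ [] := by
            simp only [ne_eq, List.take_eq_nil_iff, List.drop_eq_nil_iff]
            push Not
            omega
          simp [hc, hne]
        · have heq : (pts.drop s).take (i - s) = [] := by
            have hz : i - s = 0 := by omega
            simp [hz]
          simp [hc, heq]
      · simp only [h, Bool.false_eq_true, if_false]
        rw [ih _ (i + 1) s out pts hdrop (by omega)]
        rw [hsplit]
        simp only [pvRuns, h, Bool.false_eq_true, if_false]

-- ===== VERDICT (by name: the statement is the Claim_ definition above) =====
theorem unest_list_spec : Claim_equal_unest_list := by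
  intro points _
  unfold Spec_unest_list unest_list unest_list_alt
  rw [pvA_eq_runs points PySem.Set.empty [] [],
      pvB_eq_runs points PySem.Set.empty 0 0 [] points rfl (le_refl 0)]
  simp
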